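-- pv_equiv track=rewrite | github.com/jbliu52/StoryTrustSim | storysim.py | find_k_unique_paths
-- ===== SOURCE A (Python) =====
-- def find_k_unique_paths(g, start, end, k):
--     def dfs(node, path, visited, paths):
--         if len(paths) >= k:  # Stop early if we found k paths
--             return
--
--         if node == end:  # If reached destination, store the path
--             paths.append(list(path))
--             return
--
--         for neighbor in g.get(node, []):  # Explore neighbors
--             if neighbor not in visited:
--                 visited.add(neighbor)
--                 path.append(neighbor)
--
--                 dfs(neighbor, path, visited, paths)
--
--                 # Backtrack
--                 visited.remove(neighbor)
--                 path.pop()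
--
--     paths = []
--     dfs(start, [start], {start}, paths)  # Start DFS
--     return [len(p)-1 for p in paths[:k]],[p[1:] for p in paths[:k]]  # Return up to k paths
-- ===== SOURCE B (Python) =====
-- def find_k_unique_paths(g, start, end, k):
--     # Iterative DFS with an explicit stack of (node, path) frames instead of recursion.
--     paths = []
--     stack = [(start, [start])]
--     while stack:
--         if len(paths) >= k:
--             break
--         node, path = stack.pop()
--         if node == end:
--             paths.append(path)
--             continue
--         for nb in reversed(g.get(node, [])):
--             if nb not in path:
--                 stack.append((nb, path + [nb]))
--     return [len(p) - 1 for p in paths], [p[1:] for p in paths]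
-- ===== Notes on version B (the rewrite author's own statement) =====
-- stated objective: alternative
-- what changed: A's mutable backtracking recursion (shared path/visited mutated and restored around each call) is replaced by an iterative worklist DFS over an explicit stack of (node, path) frames, pushing unvisited neighbors in reversed order and truncating the collected paths at k before each pop.
import Mathlib
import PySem

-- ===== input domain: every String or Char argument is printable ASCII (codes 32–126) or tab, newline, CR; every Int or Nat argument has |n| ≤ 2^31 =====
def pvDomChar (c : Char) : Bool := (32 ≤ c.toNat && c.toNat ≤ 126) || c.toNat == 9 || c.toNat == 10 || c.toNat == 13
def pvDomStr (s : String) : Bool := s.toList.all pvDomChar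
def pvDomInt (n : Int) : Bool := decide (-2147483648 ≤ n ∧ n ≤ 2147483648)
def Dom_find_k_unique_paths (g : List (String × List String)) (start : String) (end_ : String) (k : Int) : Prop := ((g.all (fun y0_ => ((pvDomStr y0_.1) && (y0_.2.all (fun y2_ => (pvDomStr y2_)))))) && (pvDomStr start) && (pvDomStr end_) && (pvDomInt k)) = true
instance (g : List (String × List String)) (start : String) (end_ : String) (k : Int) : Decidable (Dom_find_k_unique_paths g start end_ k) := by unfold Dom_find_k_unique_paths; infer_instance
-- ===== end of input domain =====

-- B replaces A's mutable backtracking recursion (shared path/visited restored around each call)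
-- by an iterative worklist DFS over an explicit stack of (node, path) frames, pushing unvisited
-- neighbours in reversed order and checking the k-cutoff before each pop (objective: alternative).

-- all strings that can ever be ADDED to visited/path (every neighbour occurring in g);
-- used only for the termination measures of the ports
def pvUniv (g : List (String × List String)) : List String := g.flatMap (fun kv => kv.2)

-- g.get(node, []) pulls its values from pvUniv g (termination helper, cited by the ports)
theorem pvGetD_sub (g : List (String × List String)) (node : String) :
    ∀ x ∈ PySem.Dict.getD (PySem.Dict.mk g) node [], x ∈ pvUniv g := by
  induction g with
  | nil => intro x hx; simp [PySem.Dict.getD, PySem.Dict.get?] at hx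
  | cons p t ih =>
    intro x hx
    rw [PySem.Dict.getD_eq_get?_getD, PySem.Dict.get?_mk_cons] at hx
    by_cases h : p.1 == node
    · simp [h] at hx
      simp [pvUniv]
      exact Or.inl hx
    · simp [h, ← PySem.Dict.getD_eq_get?_getD] at hx
      have := ih x hx
      simp [pvUniv] at this ⊢
      exact Or.inr this

-- and its length is bounded by pvUniv's (termination helper for the B port)
theorem pvGetD_len (g : List (String × List String)) (node : String) :
    (PySem.Dict.getD (PySem.Dict.mk g) node []).length ≤ (pvUniv g).length := by
  induction g with
  | nil => simp [PySem.Dict.getD, PySem.Dict.get?]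
  | cons p t ih =>
    rw [PySem.Dict.getD_eq_get?_getD, PySem.Dict.get?_mk_cons]
    by_cases h : p.1 == node
    · simp [h, pvUniv]
    · simp only [h, Bool.false_eq_true, if_false, ← PySem.Dict.getD_eq_get?_getD]
      have : (pvUniv t).length ≤ (pvUniv (p :: t)).length := by
        simp [pvUniv]
      omega

-- filter with a stronger predicate keeps at most as many elements (termination helper)
theorem pvFilterMono {α : Type} (p q : α → Bool) (hpq : ∀ x, q x = true → p x = true) :
    ∀ w : List α, (w.filter q).length ≤ (w.filter p).length := by
  intro w
  induction w with
  | nil => simp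
  | cons a t ih =>
    cases hq : q a
    · cases hp : p a <;> simp [hq, hp] <;> omega
    · have hp := hpq a hq
      simp [hq, hp]
      omega

-- and strictly fewer when some member satisfies p but not q (termination helper)
theorem pvFilterLt {α : Type} (p q : α → Bool) (nb : α)
    (hpq : ∀ x, q x = true → p x = true) (hother : ∀ x, x ≠ nb → q x = p x)
    (hp : p nb = true) (hq : q nb = false) :
    ∀ u : List α, nb ∈ u → (u.filter q).length < (u.filter p).length := by
  intro u hu
  induction u with
  | nil => cases hu
  | cons a t ih =>
    by_cases ha : a = nb
    · subst ha
      simp [hp, hq]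
      have := pvFilterMono p q hpq t
      omega
    · have ht : nb ∈ t := by
        rcases List.mem_cons.mp hu with h | h
        · exact absurd h.symm ha
        · exact h
      rw [List.filter_cons, List.filter_cons, hother a ha]
      cases hpa : p a
      · simpa [hpa] using ih ht
      · simpa [hpa] using Nat.succ_lt_succ (ih ht)

-- adding a fresh node from pvUniv shrinks the set of still-addable nodes (termination helper)
theorem pvMeasure_lt (u v : List String) (nb : String) (hu : nb ∈ u) (hv : nb ∉ v) :
    ((u.filter (fun x => !PySem.Set.contains (v ++ [nb]) x)).length <
      (u.filter (fun x => !PySem.Set.contains v x)).length) := by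
  refine pvFilterLt _ _ nb ?_ ?_ ?_ ?_ u hu
  · intro x hx
    simp at hx ⊢
    tauto
  · intro x hxnb
    simp [hxnb]
  · simp [hv]
  · simp

-- ===== PORT A =====
-- A's inner dfs: the for-loop over neighbours is the mutual companion pvDfsAList; since Python's
-- backtracking restores path and visited after each child call, only `paths` is threaded.
mutual
def pvDfsA (g : List (String × List String)) (end_ : String) (k : Int)
    (node : String) (path : List String) (visited : PySem.Set String)
    (paths : List (List String)) : List (List String) :=
  if (paths.length : Int) ≥ k then paths
  else if node = end_ then paths ++ [path]
  else pvDfsAList g end_ k path visited paths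
        (PySem.Dict.getD (PySem.Dict.mk g) node []) (pvGetD_sub g node)
termination_by (((pvUniv g).filter (fun x => !PySem.Set.contains visited x)).length, 1, 0)
decreasing_by
  · exact Prod.Lex.right _ (Prod.Lex.left _ _ (by omega))

def pvDfsAList (g : List (String × List String)) (end_ : String) (k : Int)
    (path : List String) (visited : PySem.Set String) (paths : List (List String))
    (nbs : List String) (h : ∀ x ∈ nbs, x ∈ pvUniv g) : List (List String) :=
  match nbs with
  | [] => paths
  | nb :: rest =>
    if hc : PySem.Set.contains visited nb = true then
      pvDfsAList g end_ k path visited paths rest (fun x hx => h x (List.mem_cons_of_mem _ hx))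
    else
      pvDfsAList g end_ k path visited
        (pvDfsA g end_ k nb (path ++ [nb]) (PySem.Set.add visited nb) paths)
        rest (fun x hx => h x (List.mem_cons_of_mem _ hx))
termination_by (((pvUniv g).filter (fun x => !PySem.Set.contains visited x)).length, 0, nbs.length)
decreasing_by
  · exact Prod.Lex.right _ (Prod.Lex.right _ (by simp [List.length_cons]))
  · have hnb : nb ∉ visited := fun hm => hc ((PySem.Set.contains_iff _ _).mpr hm)
    rw [PySem.Set.add_of_not_mem hnb]
    exact Prod.Lex.left _ _ (pvMeasure_lt _ _ _ (h nb List.mem_cons_self) hnb)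
  · exact Prod.Lex.right _ (Prod.Lex.right _ (by simp [List.length_cons]))
end

def find_k_unique_paths (g : List (String × List String)) (start : String) (end_ : String) (k : Int) : List Int × List (List String) :=
  let paths := pvDfsA g end_ k start [start] (PySem.Set.ofList [start]) []
  let pk := PySem.List.slice paths none (some k)   -- paths[:k]
  (pk.map (fun p => (p.length : Int) - 1), pk.map (fun p => PySem.List.slice p (some 1) none))

-- ===== PORT B =====
-- B's worklist: a stack of (node, path) frames with head = top of Python's list `stack`.

-- the still-addable measure of a frame's path (termination of the B port)
def pvM (g : List (String × List String)) (path : List String) : Nat :=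
  ((pvUniv g).filter (fun x => !PySem.Set.contains path x)).length

def pvW (g : List (String × List String)) : Nat := (pvUniv g).length + 2

def pvWeight (g : List (String × List String)) (f : String × List String) : Nat :=
  pvW g ^ pvM g f.2

def pvMeas (g : List (String × List String)) (stack : List (String × List String)) : Nat :=
  (stack.map (pvWeight g)).sum

-- the for-loop over reversed(g.get(node, [])) pushing unvisited neighbours onto the stack
def pvPush (g : List (String × List String)) (path : List String)
    (rest : List (String × List String)) (node : String) : List (String × List String) :=
  (PySem.Dict.getD (PySem.Dict.mk g) node []).reverse.foldl
    (fun st nb => if nb ∈ path then st else (nb, path ++ [nb]) :: st) rest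

-- pvPush is filter-then-map prepended (termination helper, also reused by the proofs)
theorem pvPush_eq (g : List (String × List String)) (path : List String)
    (rest : List (String × List String)) (node : String) :
    pvPush g path rest node =
      ((PySem.Dict.getD (PySem.Dict.mk g) node []).filter (fun nb => decide (nb ∉ path))).map
        (fun nb => (nb, path ++ [nb])) ++ rest := by
  unfold pvPush
  generalize PySem.Dict.getD (PySem.Dict.mk g) node [] = l
  induction l generalizing rest with
  | nil => simp
  | cons a t ih =>
    rw [List.reverse_cons, List.foldl_append]
    simp only [List.foldl_cons, List.foldl_nil]
    by_cases ha : a ∈ path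
    · rw [ih]
      simp [ha]
    · rw [ih]
      simp [ha]

-- a sum of mapped values is bounded by length times a uniform bound (termination helper)
theorem pvSumLe {α : Type} (f : α → Nat) (c : Nat) :
    ∀ l : List α, (∀ x ∈ l, f x ≤ c) → (l.map f).sum ≤ l.length * c := by
  intro l
  induction l with
  | nil => simp
  | cons a t ih =>
    intro hb
    have h1 := hb a List.mem_cons_self
    have h2 := ih (fun x hx => hb x (List.mem_cons_of_mem _ hx))
    simp only [List.map_cons, List.sum_cons, List.length_cons, Nat.succ_mul]
    omega

-- pushing a frame's unvisited neighbours costs strictly less than the frame itself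
theorem pvPush_meas (g : List (String × List String)) (path : List String)
    (rest : List (String × List String)) (node : String) :
    pvMeas g (pvPush g path rest node) < pvW g ^ pvM g path + pvMeas g rest := by
  rw [pvPush_eq]
  simp only [pvMeas, List.map_append, List.sum_append, List.map_map]
  have hkey : ((List.filter (fun nb => decide (nb ∉ path)) (PySem.Dict.getD (PySem.Dict.mk g) node [])).map
      ((pvWeight g) ∘ (fun nb => (nb, path ++ [nb])))).sum < pvW g ^ pvM g path := by
    set F := List.filter (fun nb => decide (nb ∉ path)) (PySem.Dict.getD (PySem.Dict.mk g) node []) with hF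
    have hlt : ∀ nb ∈ F, pvM g (path ++ [nb]) < pvM g path := by
      intro nb hnb
      have hmem : nb ∈ PySem.Dict.getD (PySem.Dict.mk g) node [] := List.mem_of_mem_filter hnb
      have hnp : nb ∉ path := by
        have := List.of_mem_filter hnb
        simpa using this
      exact pvMeasure_lt (pvUniv g) path nb (pvGetD_sub g node nb hmem) hnp
    by_cases hFe : F = []
    · simp [hFe]
      exact Nat.pow_pos (by simp [pvW])
    · have hm1 : 1 ≤ pvM g path := by
        obtain ⟨nb0, hnb0⟩ := List.exists_mem_of_ne_nil F hFe
        have := hlt nb0 hnb0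
        omega
      obtain ⟨m', hm'⟩ : ∃ m', pvM g path = m' + 1 := ⟨pvM g path - 1, by omega⟩
      have hbound : ∀ x ∈ F, ((pvWeight g) ∘ (fun nb => (nb, path ++ [nb]))) x ≤ pvW g ^ m' := by
        intro x hx
        have := hlt x hx
        simp only [Function.comp, pvWeight]
        exact Nat.pow_le_pow_right (by simp [pvW]) (by omega)
      have hsum := pvSumLe _ _ F hbound
      have hlen : F.length ≤ (pvUniv g).length := by
        calc F.length ≤ (PySem.Dict.getD (PySem.Dict.mk g) node []).length := by
              rw [hF]; exact List.length_filter_le _ _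
          _ ≤ (pvUniv g).length := pvGetD_len g node
      have hx1 : 1 ≤ pvW g ^ m' := Nat.one_le_pow _ _ (by simp [pvW])
      calc (F.map ((pvWeight g) ∘ (fun nb => (nb, path ++ [nb])))).sum
          ≤ F.length * pvW g ^ m' := hsum
        _ ≤ (pvUniv g).length * pvW g ^ m' := Nat.mul_le_mul_right _ hlen
        _ < ((pvUniv g).length + 2) * pvW g ^ m' := by
            have := Nat.mul_lt_mul_of_lt_of_le (show (pvUniv g).length < (pvUniv g).length + 2 by omega) (le_refl (pvW g ^ m')) (by omega)
            exact this
        _ = pvW g ^ (m' + 1) := by rw [pow_succ, pvW]; ring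
        _ = pvW g ^ pvM g path := by rw [hm']
  omega

-- B's while-loop: pop a frame, cutoff at k, record a finished path or push neighbours
def pvLoopB (g : List (String × List String)) (end_ : String) (k : Int)
    (paths : List (List String)) (stack : List (String × List String)) : List (List String) :=
  match stack with
  | [] => paths
  | (node, path) :: rest =>
    if (paths.length : Int) ≥ k then paths
    else if node = end_ then pvLoopB g end_ k (paths ++ [path]) rest
    else pvLoopB g end_ k paths (pvPush g path rest node)
termination_by pvMeas g stack
decreasing_by
  · simp only [pvMeas, List.map_cons, List.sum_cons]
    have : 0 < pvWeight g (node, path) := Nat.pow_pos (by simp [pvW])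
    omega
  · have := pvPush_meas g path rest node
    simp only [pvMeas, List.map_cons, List.sum_cons, pvWeight] at *
    omega

def find_k_unique_paths_alt (g : List (String × List String)) (start : String) (end_ : String) (k : Int) : List Int × List (List String) :=
  let paths := pvLoopB g end_ k [] [(start, [start])]
  (paths.map (fun p => (p.length : Int) - 1), paths.map (fun p => PySem.List.slice p (some 1) none))

-- ===== PRECONDITION & SPEC =====
def Spec_find_k_unique_paths (g : List (String × List String)) (start : String) (end_ : String) (k : Int) (out : List Int × List (List String)) : Prop := out = find_k_unique_paths_alt g start end_ k
instance (g : List (String × List String)) (start : String) (end_ : String) (k : Int) (out : List Int × List (List String)) : Decidable (Spec_find_k_unique_paths g start end_ k out) := by unfold Spec_find_k_unique_paths; infer_instance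

-- ===== CLAIM (what is proved, stated in full; the proofs are below) =====
def Claim_equal_find_k_unique_paths : Prop := ∀ (g : List (String × List String)) (start : String) (end_ : String) (k : Int), Dom_find_k_unique_paths g start end_ k → Spec_find_k_unique_paths g start end_ k (find_k_unique_paths g start end_ k)

-- ===== LEMMAS AND PROOFS =====

-- proof-only spec function: the full list of simple paths to end_, in DFS order
mutual
def pvGenB (g : List (String × List String)) (end_ : String)
    (node : String) (path : List String) : List (List String) :=
  if node = end_ then [path]
  else pvGenBList g end_ path (PySem.Dict.getD (PySem.Dict.mk g) node []) (pvGetD_sub g node)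
termination_by (((pvUniv g).filter (fun x => !PySem.Set.contains path x)).length, 1, 0)
decreasing_by
  · exact Prod.Lex.right _ (Prod.Lex.left _ _ (by omega))

def pvGenBList (g : List (String × List String)) (end_ : String) (path : List String)
    (nbs : List String) (h : ∀ x ∈ nbs, x ∈ pvUniv g) : List (List String) :=
  match nbs with
  | [] => []
  | nb :: rest =>
    if hm : nb ∈ path then
      pvGenBList g end_ path rest (fun x hx => h x (List.mem_cons_of_mem _ hx))
    else
      pvGenB g end_ nb (path ++ [nb]) ++
        pvGenBList g end_ path rest (fun x hx => h x (List.mem_cons_of_mem _ hx))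
termination_by (((pvUniv g).filter (fun x => !PySem.Set.contains path x)).length, 0, nbs.length)
decreasing_by
  · exact Prod.Lex.right _ (Prod.Lex.right _ (by simp [List.length_cons]))
  · exact Prod.Lex.left _ _ (pvMeasure_lt _ _ _ (h nb List.mem_cons_self) hm)
  · exact Prod.Lex.right _ (Prod.Lex.right _ (by simp [List.length_cons]))
end

theorem pvTakeTakeAppend (n : Nat) (l l' : List (List String)) :
    List.take n (List.take n l ++ l') = List.take n (l ++ l') := by
  induction n generalizing l l' with
  | zero => simp
  | succ n ih =>
    cases l with
    | nil => simp
    | cons a t => simp [List.take_succ_cons, List.cons_append, ih]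

-- the key invariant: A's dfs with visited = path and paths already collected equals
-- "first k.toNat of (collected ++ all remaining simple paths in DFS order)"
mutual
theorem pvDfsA_eq (g : List (String × List String)) (end_ : String) (k : Int)
    (node : String) (path : List String) (paths : List (List String))
    (hlen : paths.length ≤ k.toNat) :
    pvDfsA g end_ k node path path paths =
      List.take k.toNat (paths ++ pvGenB g end_ node path) := by
  rw [pvDfsA, pvGenB]
  by_cases hge : (paths.length : Int) ≥ k
  · have : paths.length = k.toNat := by omega
    simp [hge, List.take_left' this]
  · have hlt : paths.length < k.toNat := by omega
    by_cases hend : node = end_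
    · have hlen2 : (paths ++ [path]).length ≤ k.toNat := by
        simp only [List.length_append, List.length_cons, List.length_nil]
        omega
      simp [hge, hend, List.take_of_length_le hlen2]
    · simp only [hge, hend, if_false]
      exact pvDfsAList_eq g end_ k path paths _ _ hlen
termination_by (((pvUniv g).filter (fun x => !PySem.Set.contains path x)).length, 1, 0)
decreasing_by
  · exact Prod.Lex.right _ (Prod.Lex.left _ _ (by omega))

theorem pvDfsAList_eq (g : List (String × List String)) (end_ : String) (k : Int)
    (path : List String) (paths : List (List String))
    (nbs : List String) (h : ∀ x ∈ nbs, x ∈ pvUniv g)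
    (hlen : paths.length ≤ k.toNat) :
    pvDfsAList g end_ k path path paths nbs h =
      List.take k.toNat (paths ++ pvGenBList g end_ path nbs h) := by
  match nbs with
  | [] =>
    rw [pvDfsAList, pvGenBList]
    simp [List.take_of_length_le hlen]
  | nb :: rest =>
    rw [pvDfsAList, pvGenBList]
    by_cases hm : nb ∈ path
    · have hc : PySem.Set.contains path nb = true := (PySem.Set.contains_iff _ _).mpr hm
      rw [dif_pos hc, dif_pos hm]
      exact pvDfsAList_eq g end_ k path paths rest _ hlen
    · have hc : ¬ PySem.Set.contains path nb = true := fun hcc => hm ((PySem.Set.contains_iff _ _).mp hcc)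
      rw [dif_neg hc, dif_neg hm, PySem.Set.add_of_not_mem hm,
        pvDfsA_eq g end_ k nb (path ++ [nb]) paths hlen,
        pvDfsAList_eq g end_ k path _ rest _ (List.length_take_le _ _),
        pvTakeTakeAppend, List.append_assoc]
termination_by (((pvUniv g).filter (fun x => !PySem.Set.contains path x)).length, 0, nbs.length)
decreasing_by
  · exact Prod.Lex.right _ (Prod.Lex.right _ (by simp [List.length_cons]))
  · exact Prod.Lex.left _ _ (pvMeasure_lt _ _ _ (h nb List.mem_cons_self) hm)
  · exact Prod.Lex.right _ (Prod.Lex.right _ (by simp [List.length_cons]))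
end

-- pvGenBList flattens the children's yields over the unvisited neighbours
theorem pvGenBList_flat (g : List (String × List String)) (end_ : String) (path : List String) :
    ∀ (nbs : List String) (h : ∀ x ∈ nbs, x ∈ pvUniv g),
      pvGenBList g end_ path nbs h =
        (nbs.filter (fun nb => decide (nb ∉ path))).flatMap
          (fun nb => pvGenB g end_ nb (path ++ [nb])) := by
  intro nbs
  induction nbs with
  | nil => intro h; rw [pvGenBList]; simp
  | cons nb rest ih =>
    intro h
    rw [pvGenBList]
    by_cases hm : nb ∈ path
    · rw [dif_pos hm, ih]
      simp [hm]
    · rw [dif_neg hm, ih]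
      simp [hm]

-- B's loop computes the same truncation, frame by frame
theorem pvLoopB_eq (g : List (String × List String)) (end_ : String) (k : Int)
    (stack : List (String × List String)) (paths : List (List String))
    (hlen : paths.length ≤ k.toNat) :
    pvLoopB g end_ k paths stack =
      List.take k.toNat (paths ++ stack.flatMap (fun f => pvGenB g end_ f.1 f.2)) := by
  match stack with
  | [] =>
    rw [pvLoopB]
    simp [List.take_of_length_le hlen]
  | (node, path) :: rest =>
    rw [pvLoopB]
    by_cases hge : (paths.length : Int) ≥ k
    · have : paths.length = k.toNat := by omega
      simp [hge, List.take_left' this]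
    · have hlt : paths.length < k.toNat := by omega
      by_cases hend : node = end_
      · rw [if_neg hge, if_pos hend,
          pvLoopB_eq g end_ k rest (paths ++ [path]) (by simp; omega)]
        subst hend
        rw [List.flatMap_cons]
        conv_rhs => rw [pvGenB]
        simp [List.append_assoc]
      · rw [if_neg hge, if_neg hend, pvLoopB_eq g end_ k (pvPush g path rest node) paths hlen]
        congr 1
        rw [pvPush_eq, List.flatMap_cons]
        conv_rhs => rw [pvGenB]
        simp only [hend, if_false, pvGenBList_flat]
        rw [List.flatMap_append, List.flatMap_map]
termination_by pvMeas g stack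
decreasing_by
  · simp only [pvMeas, List.map_cons, List.sum_cons]
    have : 0 < pvWeight g (node, path) := Nat.pow_pos (by simp [pvW])
    omega
  · have := pvPush_meas g path rest node
    simp only [pvMeas, List.map_cons, List.sum_cons, pvWeight] at *
    omega

theorem pvSlice_to_self (k : Int) (l : List (List String)) (hl : l.length ≤ k.toNat) :
    PySem.List.slice l none (some k) = l := by
  by_cases hk : 0 ≤ k
  · rw [PySem.List.slice_to l hk]
    exact List.take_of_length_le hl
  · have hk0 : k.toNat = 0 := by omega
    have hnil : l = [] := by
      cases l with
      | nil => rfl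
      | cons a t => simp [hk0] at hl
    subst hnil
    simp [PySem.List.slice]

-- ===== VERDICT (by name: the statement is the Claim_ definition above) =====
theorem find_k_unique_paths_spec : Claim_equal_find_k_unique_paths := by
  intro g start end_ k _
  unfold Spec_find_k_unique_paths
  have hof : PySem.Set.ofList [start] = [start] :=
    PySem.Set.ofList_eq_self_of_nodup [start] (by simp)
  have hA := pvDfsA_eq g end_ k start [start] [] (by simp)
  have hB := pvLoopB_eq g end_ k [(start, [start])] [] (by simp)
  simp only [List.nil_append, List.flatMap_cons, List.flatMap_nil, List.append_nil] at hA hB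
  simp only [find_k_unique_paths, find_k_unique_paths_alt, hof, hA, hB]
  rw [pvSlice_to_self k _ (List.length_take_le _ _)]
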